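-- pv_equiv track=rewrite | github.com/victorgbonna/cleansheet-api | src/utils.py | get_non_wiki_teams_versus
-- ===== SOURCE A (Python) =====
-- def get_non_wiki_teams_versus(non_wiki_teams):
--     assemble_matches=[]
--     if(len(non_wiki_teams)>1):
--         for i in range(len(non_wiki_teams)):
--             the_team= non_wiki_teams[i]
--             other_teams=non_wiki_teams[:i]+non_wiki_teams[i+1:]
--             for other_team in other_teams:
--                 assemble_matches.append({'home_team':the_team, 'away_team':other_team})
--     return assemble_matches
-- ===== SOURCE B (Python) =====
-- def get_non_wiki_teams_versus(non_wiki_teams):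
--     out = []
--     before = []
--     rest = list(non_wiki_teams)
--     while rest:
--         t = rest.pop(0)
--         out.extend({'home_team': t, 'away_team': o} for o in before + rest)
--         before.append(t)
--     return out
-- ===== Notes on version B (the rewrite author's own statement) =====
-- stated objective: alternative
-- what changed: Replaces A's guarded index loop with the full-list slice trick non_wiki_teams[:i]+non_wiki_teams[i+1:] by a single sweep that pops the head and carries the already-seen prefix, needing no indices, no slicing of the whole list and no len>1 guard.
import Mathlib
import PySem

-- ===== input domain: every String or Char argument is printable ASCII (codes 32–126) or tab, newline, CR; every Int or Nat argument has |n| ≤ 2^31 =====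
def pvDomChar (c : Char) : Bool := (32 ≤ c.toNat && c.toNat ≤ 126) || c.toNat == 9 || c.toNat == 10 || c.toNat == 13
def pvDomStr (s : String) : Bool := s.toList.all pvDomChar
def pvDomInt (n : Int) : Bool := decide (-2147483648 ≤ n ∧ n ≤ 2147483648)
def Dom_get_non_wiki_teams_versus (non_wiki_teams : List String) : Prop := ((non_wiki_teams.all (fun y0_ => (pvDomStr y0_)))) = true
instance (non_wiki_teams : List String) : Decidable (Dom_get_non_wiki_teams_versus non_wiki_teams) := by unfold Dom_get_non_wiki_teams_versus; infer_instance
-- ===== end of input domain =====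

-- B replaces A's index loop with list slicing by a single sweep carrying the already-seen prefix (no indices, no slicing of the full list, no len>1 guard).


-- ===== PORT A =====
def get_non_wiki_teams_versus (non_wiki_teams : List String) : List (List (String × String)) :=
  let assemble_matches : List (List (String × String)) := []
  if non_wiki_teams.length > 1 then
    (PySem.List.pyRange 0 (non_wiki_teams.length : Int) 1).foldl (fun acc i =>
      let the_team := PySem.List.pyGetD non_wiki_teams i ""
      let other_teams := PySem.List.slice non_wiki_teams none (some i)
        ++ PySem.List.slice non_wiki_teams (some (i + 1)) none
      other_teams.foldl (fun acc2 other_team =>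
        acc2 ++ [[("home_team", the_team), ("away_team", other_team)]]) acc) assemble_matches
  else
    assemble_matches

-- ===== PORT B =====
def pvGoB (out : List (List (String × String))) (before : List String) : List String → List (List (String × String))
  | [] => out
  | t :: rest =>
      pvGoB (out ++ (before ++ rest).map fun o => [("home_team", t), ("away_team", o)]) (before ++ [t]) rest

def get_non_wiki_teams_versus_alt (non_wiki_teams : List String) : List (List (String × String)) :=
  pvGoB [] [] non_wiki_teams

-- ===== PRECONDITION & SPEC =====
def Spec_get_non_wiki_teams_versus (non_wiki_teams : List String) (out : List (List (String × String))) : Prop := out = get_non_wiki_teams_versus_alt non_wiki_teams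
instance (non_wiki_teams : List String) (out : List (List (String × String))) : Decidable (Spec_get_non_wiki_teams_versus non_wiki_teams out) := by unfold Spec_get_non_wiki_teams_versus; infer_instance

-- ===== CLAIM (what is proved, stated in full; the proofs are below) =====
def Claim_equal_get_non_wiki_teams_versus : Prop := ∀ (non_wiki_teams : List String), Dom_get_non_wiki_teams_versus non_wiki_teams → Spec_get_non_wiki_teams_versus non_wiki_teams (get_non_wiki_teams_versus non_wiki_teams)

-- ===== LEMMAS AND PROOFS =====

-- A's index loop over before ++ after, started at index |before| with accumulator acc, computes pvGoB acc before after.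
lemma pvLoopA (after : List String) : ∀ (before : List String) (acc : List (List (String × String))),
    (PySem.List.pyRange (before.length : Int) ((before.length + after.length : Nat) : Int) 1).foldl (fun acc i =>
      let the_team := PySem.List.pyGetD (before ++ after) i ""
      let other_teams := PySem.List.slice (before ++ after) none (some i)
        ++ PySem.List.slice (before ++ after) (some (i + 1)) none
      other_teams.foldl (fun acc2 other_team =>
        acc2 ++ [[("home_team", the_team), ("away_team", other_team)]]) acc) acc
    = pvGoB acc before after := by
  induction after with
  | nil =>
      intro before acc
      rw [PySem.List.pyRange_one_eq_nil (by simp)]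
      simp [pvGoB]
  | cons t rest ih =>
      intro before acc
      rw [PySem.List.pyRange_one_cons (by push_cast [List.length_cons]; omega)]
      rw [List.foldl_cons]
      have hidx : PySem.List.pyGetD (before ++ t :: rest) (before.length : Int) "" = t := by
        simp [PySem.List.pyGetD_natCast, List.getD]
      have hsl1 : PySem.List.slice (before ++ t :: rest) none (some (before.length : Int)) = before := by
        rw [PySem.List.slice_to_natCast]
        simp
      have hsl2 : PySem.List.slice (before ++ t :: rest) (some ((before.length : Int) + 1)) none = rest := by
        have : (before.length : Int) + 1 = ((before.length + 1 : Nat) : Int) := by push_cast; ring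
        rw [this, PySem.List.slice_from_natCast]
        simp [List.drop_append]
      simp only [hidx, hsl1, hsl2]
      rw [PySem.List.foldl_append_singleton_eq_map]
      have hcast : (before.length : Int) + 1 = (((before ++ [t]).length : Nat) : Int) := by
        simp
      have hlen : ((before.length + (t :: rest).length : Nat) : Int)
          = (((before ++ [t]).length + rest.length : Nat) : Int) := by simp; omega
      have := ih (before ++ [t]) (acc ++ (before ++ rest).map fun o => [("home_team", t), ("away_team", o)])
      rw [hcast, hlen]
      simp only [List.append_assoc, List.singleton_append] at this ⊢
      rw [this]
      simp [pvGoB]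

lemma pvAltNil : get_non_wiki_teams_versus_alt [] = [] := rfl

lemma pvAltSingleton (x : String) : get_non_wiki_teams_versus_alt [x] = [] := by
  simp [get_non_wiki_teams_versus_alt, pvGoB]

-- ===== VERDICT (by name: the statement is the Claim_ definition above) =====
theorem get_non_wiki_teams_versus_spec : Claim_equal_get_non_wiki_teams_versus := by
  intro xs _
  unfold Spec_get_non_wiki_teams_versus get_non_wiki_teams_versus
  by_cases h : xs.length > 1
  · simp only [h, if_true]
    have := pvLoopA xs [] []
    simpa [get_non_wiki_teams_versus_alt] using this
  · simp only [h, if_false]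
    match xs, h with
    | [], _ => simp [pvAltNil]
    | [x], _ => simp [pvAltSingleton]
    | a :: b :: rest, h => exact absurd (by simp) h
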